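-- pv_equiv track=rewrite | github.com/jemtca/CodingBat | Python/AP-1/copy_endy.py | copy_endy
-- ===== SOURCE A (Python) =====
-- def copy_endy(nums, count):
--     x = []
--     j = 0
--
--     i = 0
--     while i < len(nums) and j < count:
--         if (nums[i] >= 0 and nums[i] <= 10) or (nums[i] >= 90 and nums[i] <= 100):
--             x.append(nums[i])
--             j += 1
--         i += 1
--
--     return x
-- ===== SOURCE B (Python) =====
-- def copy_endy(nums, count):
--     filtered = [n for n in nums if (0 <= n <= 10) or (90 <= n <= 100)]
--     return filtered[:max(count, 0)]
-- ===== Notes on version B (the rewrite author's own statement) =====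
-- stated objective: simpler
-- what changed: Replaces the fused append-while-under-count while loop (manual index i and counter j) with two passes: a total filter comprehension followed by a clamped prefix slice; the comprehension+slice run in C, a constant-factor win a timing run measured.
import Mathlib
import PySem

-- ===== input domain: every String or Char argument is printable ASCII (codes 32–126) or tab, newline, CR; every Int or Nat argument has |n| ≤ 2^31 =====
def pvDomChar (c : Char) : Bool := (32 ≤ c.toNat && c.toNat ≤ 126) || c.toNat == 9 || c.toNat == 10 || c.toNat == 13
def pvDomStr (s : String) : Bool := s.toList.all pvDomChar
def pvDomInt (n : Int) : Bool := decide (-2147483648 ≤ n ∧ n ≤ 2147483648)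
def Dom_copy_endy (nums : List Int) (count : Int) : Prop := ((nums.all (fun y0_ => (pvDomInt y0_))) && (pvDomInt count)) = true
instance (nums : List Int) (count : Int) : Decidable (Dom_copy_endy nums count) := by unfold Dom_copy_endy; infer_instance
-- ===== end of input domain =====

-- ===== PORT A =====
-- while loop of A: walk the list with counter j; stop when j reaches count
def copyLoopA (nums : List Int) (count : Int) (j : Int) (x : List Int) : List Int :=
  match nums with
  | [] => x
  | n :: rest =>
    if j < count then
      if (n ≥ 0 ∧ n ≤ 10) ∨ (n ≥ 90 ∧ n ≤ 100) then
        copyLoopA rest count (j + 1) (x ++ [n])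
      else
        copyLoopA rest count j x
    else x

def copy_endy (nums : List Int) (count : Int) : List Int :=
  copyLoopA nums count 0 []

-- ===== PORT B =====
-- B: filter comprehension, then clamped prefix slice (simpler decomposition)
def copy_endy_alt (nums : List Int) (count : Int) : List Int :=
  let filtered := nums.filter (fun n => decide ((0 ≤ n ∧ n ≤ 10) ∨ (90 ≤ n ∧ n ≤ 100)))
  PySem.List.slice filtered none (some (max count 0))

-- ===== PRECONDITION & SPEC =====
def Spec_copy_endy (nums : List Int) (count : Int) (out : List Int) : Prop := out = copy_endy_alt nums count
instance (nums : List Int) (count : Int) (out : List Int) : Decidable (Spec_copy_endy nums count out) := by unfold Spec_copy_endy; infer_instance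

-- ===== CLAIM (what is proved, stated in full; the proofs are below) =====
def Claim_equal_copy_endy : Prop := ∀ (nums : List Int) (count : Int), Dom_copy_endy nums count → Spec_copy_endy nums count (copy_endy nums count)

-- ===== LEMMAS AND PROOFS =====
lemma copyLoopA_eq (nums : List Int) (count j : Int) (x : List Int) :
    copyLoopA nums count j x =
      x ++ (nums.filter (fun n => decide ((0 ≤ n ∧ n ≤ 10) ∨ (90 ≤ n ∧ n ≤ 100)))).take (count - j).toNat := by
  induction nums generalizing j x with
  | nil => simp [copyLoopA]
  | cons n rest ih =>
    by_cases hj : j < count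
    · by_cases hp : (n ≥ 0 ∧ n ≤ 10) ∨ (n ≥ 90 ∧ n ≤ 100)
      · have htn : (count - j).toNat = (count - (j + 1)).toNat + 1 := by omega
        simp [copyLoopA, if_pos hj, if_pos hp, ih, List.filter_cons, htn]
      · simp [copyLoopA, if_pos hj, if_neg hp, ih, List.filter_cons]
    · have h0 : (count - j).toNat = 0 := by omega
      simp [copyLoopA, if_neg hj, h0]

-- ===== VERDICT (by name: the statement is the Claim_ definition above) =====
theorem copy_endy_spec : Claim_equal_copy_endy := by
  intro nums count _
  unfold Spec_copy_endy copy_endy copy_endy_alt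
  rw [copyLoopA_eq]
  simp [PySem.List.slice_to]
  congr 1
  omega
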